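-- pv_equiv track=rewrite | github.com/luornor/A2SV | codeforces-solutions/A_Odd_Divisor.py | solve
-- ===== SOURCE A (Python) =====
-- def solve(n):
--     if n % 2 == 1:
--         return "YES"  # n is odd, so it has an odd divisor greater than 1
--     else:
--         while n % 2 == 0:
--             n //= 2  # Divide n by 2 until it's no longer even
--         if n > 1:
--             return "YES"  # If n is greater than 1, it means it has an odd divisor
--         else:
--             return "NO" # If n is 1, it means it only has 1 as a divisor, which is not odd
-- ===== SOURCE B (Python) =====
-- def solve(n):
--     if n % 2 == 1:
--         return "YES"
--     return "YES" if n & (n - 1) != 0 else "NO"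
-- ===== Notes on version B (the rewrite author's own statement) =====
-- stated objective: simpler
-- what changed: Replaces the while-loop that divides out factors of two (then tests the remainder against 1) with a single closed-form power-of-two bit test n & (n - 1).
-- outside the precondition, e.g. on solve(-6): A returns 'NO', B returns 'YES'; on solve(0): A does not finish within the time limit, B returns 'NO'
import Mathlib
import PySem

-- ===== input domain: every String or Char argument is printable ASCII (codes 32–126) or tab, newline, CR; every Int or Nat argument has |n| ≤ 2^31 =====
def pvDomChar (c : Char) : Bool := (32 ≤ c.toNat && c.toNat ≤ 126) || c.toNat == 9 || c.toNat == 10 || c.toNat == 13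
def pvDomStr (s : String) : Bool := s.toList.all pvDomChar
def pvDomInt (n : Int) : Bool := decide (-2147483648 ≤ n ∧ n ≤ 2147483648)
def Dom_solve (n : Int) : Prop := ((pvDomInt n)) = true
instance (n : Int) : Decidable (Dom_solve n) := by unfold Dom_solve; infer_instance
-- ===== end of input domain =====

-- B replaces A's divide-out-twos while loop with the closed-form bit test n & (n - 1) (simpler).

-- ===== PORT A =====
-- A's while loop: divide n by 2 while it is even (the n ≠ 0 guard only makes the
-- recursion total in Lean; Python diverges at 0, which Pre_solve excludes)
def stripTwos (n : Int) : Int :=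
  if h : n ≠ 0 ∧ PySem.Int.mod n 2 = 0 then stripTwos (PySem.Int.floordiv n 2) else n
termination_by n.natAbs
decreasing_by
  obtain ⟨h0, h2⟩ := h
  rw [PySem.Int.floordiv_eq_ediv_of_pos (by omega)]
  rw [PySem.Int.mod_eq_emod_of_pos (by omega)] at h2
  omega

def solve (n : Int) : String :=
  if PySem.Int.mod n 2 = 1 then "YES"
  else
    let m := stripTwos n
    if m > 1 then "YES" else "NO"

-- ===== PORT B =====
def solve_alt (n : Int) : String :=
  if PySem.Int.mod n 2 = 1 then "YES"
  else if PySem.Int.band n (n - 1) ≠ 0 then "YES" else "NO"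

-- ===== PRECONDITION & SPEC =====
-- Pre_ excludes even n ≤ 0, outside the problem's positive domain: A loops forever on 0
-- and its floor-division loop ends on a negative odd value for negative even n, so A answers "NO" there.
def Pre_solve (n : Int) : Prop := 1 ≤ n ∨ PySem.Int.mod n 2 = 1
instance (n : Int) : Decidable (Pre_solve n) := by unfold Pre_solve; infer_instance
def pvWitness_solve : Int := (12)
def Spec_solve (n : Int) (out : String) : Prop := out = solve_alt n
instance (n : Int) (out : String) : Decidable (Spec_solve n out) := by unfold Spec_solve; infer_instance

-- ===== CLAIM (what is proved, stated in full; the proofs are below) =====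
def Claim_equal_solve : Prop := ∀ (n : Int), Dom_solve n → Pre_solve n → Spec_solve n (solve n)

-- ===== LEMMAS AND PROOFS =====

theorem stripTwos_cast_odd (m : ℕ) (h : m % 2 = 1) : stripTwos (m : ℤ) = (m : ℤ) := by
  rw [stripTwos, dif_neg]
  rintro ⟨-, h2⟩
  rw [PySem.Int.mod_eq_emod_of_pos (by omega)] at h2
  omega

theorem stripTwos_cast_even (m : ℕ) (h : m % 2 = 0) (h0 : m ≠ 0) :
    stripTwos (m : ℤ) = stripTwos ((m / 2 : ℕ) : ℤ) := by
  rw [stripTwos, dif_pos]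
  · rw [PySem.Int.floordiv_eq_ediv_of_pos (by omega)]
    norm_cast
  · refine ⟨by exact_mod_cast h0, ?_⟩
    rw [PySem.Int.mod_eq_emod_of_pos (by omega)]
    omega

theorem pow2_of_odd (m : ℕ) (h : m % 2 = 1) : (∃ k, m = 2 ^ k) ↔ m = 1 := by
  constructor
  · rintro ⟨k, rfl⟩
    cases k with
    | zero => rfl
    | succ j => simp [pow_succ, Nat.mul_mod_left] at h
  · rintro rfl; exact ⟨0, rfl⟩

theorem pow2_double (j : ℕ) (hj : 0 < j) : (∃ k, 2 * j = 2 ^ k) ↔ ∃ k, j = 2 ^ k := by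
  constructor
  · rintro ⟨k, hk⟩
    cases k with
    | zero => omega
    | succ i => exact ⟨i, by rw [pow_succ] at hk; omega⟩
  · rintro ⟨k, rfl⟩
    exact ⟨k + 1, by rw [pow_succ]; ring⟩

-- characterisation of A's loop: for positive m it returns a value ≥ 1, equal to 1
-- exactly when m is a power of two
theorem stripTwos_char (m : ℕ) (hm : 0 < m) :
    1 ≤ stripTwos (m : ℤ) ∧ (stripTwos (m : ℤ) = 1 ↔ ∃ k, m = 2 ^ k) := by
  induction m using Nat.strong_induction_on with
  | _ m ih =>
    rcases Nat.even_or_odd m with he | ho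
    · have h2 : m % 2 = 0 := Nat.even_iff.mp he
      obtain ⟨j, rfl⟩ : ∃ j, m = 2 * j := ⟨m / 2, by omega⟩
      have hj : 0 < j := by omega
      have hrec := ih j (by omega) hj
      rw [stripTwos_cast_even (2 * j) (by omega) (by omega), show 2 * j / 2 = j by omega]
      exact ⟨hrec.1, hrec.2.trans (pow2_double j hj).symm⟩
    · have h1 : m % 2 = 1 := Nat.odd_iff.mp ho
      rw [stripTwos_cast_odd m h1]
      refine ⟨by exact_mod_cast hm, ?_⟩
      rw [show ((m : ℤ) = 1) ↔ m = 1 from by exact_mod_cast Iff.rfl]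
      exact (pow2_of_odd m h1).symm

theorem land_two_mul_succ (j k : ℕ) : (2 * j) &&& (2 * k + 1) = 2 * (j &&& k) := by
  simpa [Nat.bit] using Nat.land_bit false j true k

theorem land_odd_pred (j : ℕ) : (2 * j + 1) &&& (2 * j) = 2 * j := by
  simpa [Nat.bit, Nat.and_self] using Nat.land_bit true j false j

-- characterisation of B's bit test on ℕ
theorem land_pred_char (m : ℕ) (hm : 0 < m) : (m &&& (m - 1)) = 0 ↔ ∃ k, m = 2 ^ k := by
  induction m using Nat.strong_induction_on with
  | _ m ih =>
    rcases Nat.even_or_odd m with he | ho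
    · have h2 : m % 2 = 0 := Nat.even_iff.mp he
      obtain ⟨j, rfl⟩ : ∃ j, m = 2 * j := ⟨m / 2, by omega⟩
      have hj : 0 < j := by omega
      rw [show 2 * j - 1 = 2 * (j - 1) + 1 by omega, land_two_mul_succ,
        show j &&& j - 1 = j &&& (j - 1) from rfl]
      have hrec := ih j (by omega) hj
      constructor
      · intro h
        exact (pow2_double j hj).mpr (hrec.mp (by omega))
      · intro h
        have := hrec.mpr ((pow2_double j hj).mp h)
        omega
    · have h1 : m % 2 = 1 := Nat.odd_iff.mp ho
      obtain ⟨j, rfl⟩ : ∃ j, m = 2 * j + 1 := ⟨m / 2, by omega⟩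
      rw [show 2 * j + 1 - 1 = 2 * j by omega, land_odd_pred]
      rw [pow2_of_odd (2 * j + 1) (by omega)]
      omega

theorem band_cast (a b : ℕ) : PySem.Int.band (a : ℤ) (b : ℤ) = ((a &&& b : ℕ) : ℤ) := by
  simp [PySem.Int.band]

theorem solve_eq_alt (n : Int) (hpre : Pre_solve n) : solve n = solve_alt n := by
  unfold solve solve_alt
  by_cases h1 : PySem.Int.mod n 2 = 1
  · have h1' : n % 2 = 1 := by
      rw [← PySem.Int.mod_eq_emod_of_pos (show (0:ℤ) < 2 by norm_num)]; exact h1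
    simp [h1']
  · simp only [h1, if_false]
    have hm2 : PySem.Int.mod n 2 = n % 2 := PySem.Int.mod_eq_emod_of_pos (by omega)
    have heven : n % 2 = 0 := by rw [hm2] at h1; omega
    have hn1 : 1 ≤ n := by
      rcases hpre with h | h
      · exact h
      · exact absurd h h1
    obtain ⟨m, rfl⟩ : ∃ m : ℕ, n = (m : ℤ) := ⟨n.toNat, (Int.toNat_of_nonneg (by omega)).symm⟩
    have hm0 : 0 < m := by exact_mod_cast hn1
    have hchar := stripTwos_char m hm0
    have hland := land_pred_char m hm0
    rw [show ((m : ℤ) - 1) = ((m - 1 : ℕ) : ℤ) by omega, band_cast]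
    by_cases hp : ∃ k, m = 2 ^ k
    · have hs1 : stripTwos (m : ℤ) = 1 := hchar.2.mpr hp
      have hl0 : (m &&& (m - 1)) = 0 := hland.mpr hp
      simp [hs1, hl0]
    · have hgt : stripTwos (m : ℤ) > 1 := by
        have h1' : stripTwos (m : ℤ) ≠ 1 := fun h => hp (hchar.2.mp h)
        have := hchar.1; omega
      have hl0 : (m &&& (m - 1)) ≠ 0 := fun h => hp (hland.mp h)
      simp [hgt, hl0]

-- ===== VERDICT (by name: the statement is the Claim_ definition above) =====
theorem solve_spec : Claim_equal_solve := by
  intro n _ hpre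
  unfold Spec_solve
  exact solve_eq_alt n hpre
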